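-- pv_equiv track=rewrite | github.com/LakshmiPoojithaLysetti/Project1 | 2. Preferred Cities/project.py | find_starting_city
-- ===== SOURCE A (Python) =====
-- def find_starting_city(D, F, mpg):
-- #'TC' be the total number of cities
--     TC = len(D)
--
-- # 'SC' be the start city
--     for SC in range(TC):
--
--         fuel_left = 0
-- # 'CC' being the current city is equal to start city
--         CC = SC
--         can_complete_journey = True
--         for _ in range(TC):
--             fuel_left += F[CC] * mpg - D[CC]
--             if fuel_left < 0:
--                 can_complete_journey = False
--                 break
--
--             CC = (CC + 1) % TC
--
--         if can_complete_journey: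
--             return SC
-- # No valid starting city found
--
--     return -1
-- ===== SOURCE B (Python) =====
-- def find_starting_city(D, F, mpg):
--     n = len(D)
--     if n == 0:
--         return -1
--     # P[k] = net fuel accumulated over the first k cities from city 0
--     P = [0]
--     minpre = [0]  # minpre[s] = min(P[1..s]) for s >= 1 (index 0 unused)
--     for i in range(n):
--         P.append(P[i] + F[i] * mpg - D[i])
--         minpre.append(P[i + 1] if i == 0 else min(minpre[i], P[i + 1]))
--     total = P[n]
--     # scan starts from high to low keeping a running suffix minimum of P;
--     # the last valid start recorded is the smallest one
--     best = -1
--     minsuf = P[n]  # min(P[s+1..n]) while handling start s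
--     for s in range(n - 1, -1, -1):
--         if minsuf >= P[s] and (s == 0 or total + minpre[s] >= P[s]):
--             best = s
--         minsuf = min(minsuf, P[s])
--     return best
-- ===== Notes on version B (the rewrite author's own statement) =====
-- stated objective: alternative
-- what changed: A re-simulates the whole cyclic journey from every start city (nested loops, O(n^2) worst case); B instead computes prefix sums of the net fuel gains with precomputed prefix minima and a running suffix minimum, deciding each start in O(1) over one forward and one backward pass (O(n) always, though A's early exits make it comparable in measured speed on random inputs).
import Mathlib
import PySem

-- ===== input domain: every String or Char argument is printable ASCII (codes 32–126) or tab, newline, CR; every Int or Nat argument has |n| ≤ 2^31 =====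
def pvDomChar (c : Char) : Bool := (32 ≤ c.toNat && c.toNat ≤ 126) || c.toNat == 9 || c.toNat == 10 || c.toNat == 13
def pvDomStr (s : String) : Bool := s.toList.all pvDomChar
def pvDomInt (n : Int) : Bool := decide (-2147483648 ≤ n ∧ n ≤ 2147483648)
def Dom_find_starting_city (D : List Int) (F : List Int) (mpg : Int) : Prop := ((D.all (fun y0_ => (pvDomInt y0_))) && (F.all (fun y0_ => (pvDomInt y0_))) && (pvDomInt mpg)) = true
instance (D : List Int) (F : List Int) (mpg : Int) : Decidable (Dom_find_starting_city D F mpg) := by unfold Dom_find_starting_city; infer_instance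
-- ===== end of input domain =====

-- B replaces A's brute-force per-start re-simulation by prefix sums with
-- precomputed prefix minima and a running suffix minimum: one forward pass and
-- one backward pass returning the smallest valid start (objective: alternative).

-- ===== PORT A =====
-- inner 'for _ in range(TC)' loop: state (fuel_left, CC), early break on fuel < 0
def pvInnerA (D : List Int) (F : List Int) (mpg : Int) (TC : Int) : Nat → Int → Int → Bool
  | 0, _, _ => true
  | t+1, fuel, CC =>
    let fuel' := fuel + ((PySem.List.pyGet? F CC).getD 0 * mpg - (PySem.List.pyGet? D CC).getD 0)
    if fuel' < 0 then false
    else pvInnerA D F mpg TC t fuel' (PySem.Int.mod (CC + 1) TC)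

-- outer 'for SC in range(TC)' loop with early return
def pvOuterA (D : List Int) (F : List Int) (mpg : Int) (TC : Int) : Nat → Int → Int
  | 0, _ => -1
  | k+1, SC => if pvInnerA D F mpg TC TC.toNat 0 SC then SC else pvOuterA D F mpg TC k (SC + 1)

def find_starting_city (D : List Int) (F : List Int) (mpg : Int) : Int :=
  let TC : Int := D.length
  pvOuterA D F mpg TC TC.toNat 0

-- ===== PORT B =====
-- forward pass of Source B: appends P[i+1] and minpre[i+1] for i = 0..n-1
def pvStepB (D : List Int) (F : List Int) (mpg : Int) (st : List Int × List Int) (i : Nat) : List Int × List Int :=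
  let P := st.1
  let mp := st.2
  let pi1 := P.getD i 0 + ((PySem.List.pyGet? F (i : Int)).getD 0 * mpg - (PySem.List.pyGet? D (i : Int)).getD 0)
  (P ++ [pi1], mp ++ [if i = 0 then pi1 else min (mp.getD i 0) pi1])

-- backward pass of Source B: s = k-1 down to 0, running suffix minimum, best start found
def pvScanB (P : List Int) (mp : List Int) (total : Int) : Nat → Int → Int → Int
  | 0, _, best => best
  | s+1, minsuf, best =>
    let Ps := P.getD s 0
    let best' := if minsuf ≥ Ps ∧ (s = 0 ∨ total + mp.getD s 0 ≥ Ps) then (s : Int) else best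
    pvScanB P mp total s (min minsuf Ps) best'

def find_starting_city_alt (D : List Int) (F : List Int) (mpg : Int) : Int :=
  let n := D.length
  if n = 0 then -1
  else
    let st := (List.range n).foldl (pvStepB D F mpg) ([0], [0])
    let total := st.1.getD n 0
    pvScanB st.1 st.2 total n total (-1)

-- ===== PRECONDITION & SPEC =====
-- Pre_ excludes exactly the inputs where Python A raises IndexError: whenever
-- len(F) < len(D) every start either reads F out of range or would have to
-- complete the full cycle (which reads F out of range), so A never returns there.
def Pre_find_starting_city (D : List Int) (F : List Int) (mpg : Int) : Prop := D.length ≤ F.length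
instance (D : List Int) (F : List Int) (mpg : Int) : Decidable (Pre_find_starting_city D F mpg) := by unfold Pre_find_starting_city; infer_instance

def pvWitness_find_starting_city : List Int × List Int × Int := ([1, 2], [2, 1], 1)

def Spec_find_starting_city (D : List Int) (F : List Int) (mpg : Int) (out : Int) : Prop := out = find_starting_city_alt D F mpg
instance (D : List Int) (F : List Int) (mpg : Int) (out : Int) : Decidable (Spec_find_starting_city D F mpg out) := by unfold Spec_find_starting_city; infer_instance

-- ===== CLAIM (what is proved, stated in full; the proofs are below) =====
def Claim_equal_find_starting_city : Prop := ∀ (D : List Int) (F : List Int) (mpg : Int), Dom_find_starting_city D F mpg → Pre_find_starting_city D F mpg → Spec_find_starting_city D F mpg (find_starting_city D F mpg)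

-- ===== LEMMAS AND PROOFS =====

-- per-city net fuel gain, prefix sums, prefix minima, suffix minima (proof-side)
def pvGV (D : List Int) (F : List Int) (mpg : Int) (c : Int) : Int :=
  (PySem.List.pyGet? F c).getD 0 * mpg - (PySem.List.pyGet? D c).getD 0

def pvPsum (D : List Int) (F : List Int) (mpg : Int) : Nat → Int
  | 0 => 0
  | k+1 => pvPsum D F mpg k + pvGV D F mpg k

def pvMpf (D : List Int) (F : List Int) (mpg : Int) : Nat → Int
  | 0 => 0
  | k+1 => if k = 0 then pvPsum D F mpg 1 else min (pvMpf D F mpg k) (pvPsum D F mpg (k+1))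

def pvMSa (D : List Int) (F : List Int) (mpg : Int) (len : Nat) : Nat → Int
  | 0 => pvPsum D F mpg len
  | j+1 => min (pvMSa D F mpg len j) (pvPsum D F mpg (len - 1 - j))

-- cyclic walk sum mirroring A's inner loop index updates
def pvCyc (D : List Int) (F : List Int) (mpg : Int) (n : Int) : Int → Nat → Int
  | _, 0 => 0
  | c, t+1 => pvGV D F mpg c + pvCyc D F mpg n (PySem.Int.mod (c + 1) n) t

def pvValidB (D : List Int) (F : List Int) (mpg : Int) (s : Nat) : Prop :=
  pvMSa D F mpg D.length (D.length - 1 - s) ≥ pvPsum D F mpg s ∧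
    (s = 0 ∨ pvPsum D F mpg D.length + pvMpf D F mpg s ≥ pvPsum D F mpg s)

def pvFv (D : List Int) (F : List Int) (mpg : Int) : Nat → Option Nat
  | 0 => none
  | k+1 =>
    match pvFv D F mpg k with
    | some s => some s
    | none =>
      if pvMSa D F mpg D.length (D.length - 1 - k) ≥ pvPsum D F mpg k ∧
          (k = 0 ∨ pvPsum D F mpg D.length + pvMpf D F mpg k ≥ pvPsum D F mpg k)
      then some k else none

def pvFirst (o : Option Nat) (d : Int) : Int := o.elim d (fun s => (s : Int))

theorem pv_gv_psum (D F : List Int) (mpg : Int) (c : Nat) :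
    pvGV D F mpg (c : Int) = pvPsum D F mpg (c+1) - pvPsum D F mpg c := by
  simp [pvPsum]

theorem pv_mod_step (len c : Nat) (h : c < len) :
    PySem.Int.mod ((c : Int) + 1) (len : Int) =
      if c + 1 = len then 0 else (((c+1 : Nat)) : Int) := by
  have hpos : (0:Int) < (len : Int) := by omega
  rw [PySem.Int.mod_eq_emod_of_pos hpos]
  by_cases h1 : c + 1 = len
  · rw [if_pos h1]
    have : ((c : Int) + 1) = (len : Int) := by omega
    rw [this, Int.emod_self]
  · rw [if_neg h1]
    rw [Int.emod_eq_of_lt (by omega) (by omega)]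
    omega

theorem pv_getD_map_range (f : Nat → Int) (m k : Nat) (hk : k < m) :
    ((List.range m).map f).getD k 0 = f k := by
  simp [List.getD_eq_getElem?_getD, List.getElem?_map, List.getElem?_range, hk]


theorem pv_inner_iff (D F : List Int) (mpg n : Int) :
    ∀ (t : Nat) (fuel c : Int),
      (pvInnerA D F mpg n t fuel c = true ↔
        ∀ u : Nat, 1 ≤ u → u ≤ t → 0 ≤ fuel + pvCyc D F mpg n c u) := by
  intro t
  induction t with
  | zero =>
    intro fuel c
    constructor
    · intro _ u h1 h2; omega
    · intro _; rfl
  | succ t ih =>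
    intro fuel c
    show (if fuel + pvGV D F mpg c < 0 then false
          else pvInnerA D F mpg n t (fuel + pvGV D F mpg c) (PySem.Int.mod (c+1) n)) = true ↔ _
    by_cases hf : fuel + pvGV D F mpg c < 0
    · rw [if_pos hf]
      simp only [Bool.false_eq_true, false_iff]
      intro hall
      have h1 := hall 1 le_rfl (by omega)
      simp only [pvCyc] at h1
      linarith
    · rw [if_neg hf, ih]
      constructor
      · intro h u h1 h2
        match u with
        | 1 =>
          show 0 ≤ fuel + pvCyc D F mpg n c 1
          simp only [pvCyc]
          linarith
        | (v+2) =>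
          have hv := h (v+1) (by omega) (by omega)
          show 0 ≤ fuel + pvCyc D F mpg n c (v+2)
          simp only [pvCyc] at hv ⊢
          linarith
      · intro h u h1 h2
        have hv := h (u+1) (by omega) (by omega)
        simp only [pvCyc] at hv
        linarith


theorem pv_cyc_closed (D F : List Int) (mpg : Int) :
    ∀ (t : Nat) (c : Nat), c < D.length → t ≤ D.length →
      pvCyc D F mpg (D.length : Int) (c : Int) t =
        (if c + t ≤ D.length then pvPsum D F mpg (c + t) - pvPsum D F mpg c
         else (pvPsum D F mpg D.length - pvPsum D F mpg c) + pvPsum D F mpg (c + t - D.length)) := by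
  intro t
  induction t with
  | zero =>
    intro c hc ht
    rw [if_pos (by omega)]
    simp [pvCyc]
  | succ t ih =>
    intro c hc ht
    show pvGV D F mpg (c : Int) + pvCyc D F mpg (D.length : Int) (PySem.Int.mod ((c:Int)+1) (D.length : Int)) t = _
    rw [pv_mod_step D.length c hc, pv_gv_psum]
    by_cases h1 : c + 1 = D.length
    · rw [if_pos h1]
      have h0 : (0 : Int) = ((0 : Nat) : Int) := rfl
      rw [h0, ih 0 (by omega) (by omega)]
      rw [if_pos (by omega)]
      simp only [Nat.zero_add]
      have hps0 : pvPsum D F mpg 0 = 0 := rfl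
      by_cases h2 : c + (t+1) ≤ D.length
      · have ht0 : t = 0 := by omega
        subst ht0
        rw [if_pos h2]
        have e : c + (0 + 1) = c + 1 := by omega
        rw [e, hps0]
        norm_num
      · rw [if_neg h2]
        have e1 : c + (t+1) - D.length = t := by omega
        rw [e1, hps0, ← h1]
        ring
    · rw [if_neg h1]
      rw [ih (c+1) (by omega) (by omega)]
      have e1 : c + (t+1) = c + 1 + t := by omega
      rw [e1]
      by_cases h2 : c + 1 + t ≤ D.length
      · rw [if_pos h2, if_pos h2]; ring
      · rw [if_neg h2, if_neg h2]; ring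


theorem pv_MSa_iff (D F : List Int) (mpg : Int) (len : Nat) :
    ∀ j, j < len → ∀ x : Int,
      (x ≤ pvMSa D F mpg len j ↔ ∀ k, len - j ≤ k → k ≤ len → x ≤ pvPsum D F mpg k) := by
  intro j
  induction j with
  | zero =>
    intro _ x
    constructor
    · intro h k hk1 hk2
      have : k = len := by omega
      rw [this]; exact h
    · intro h; exact h len (by omega) le_rfl
  | succ j ih =>
    intro hj x
    show x ≤ min (pvMSa D F mpg len j) (pvPsum D F mpg (len - 1 - j)) ↔ _
    rw [le_min_iff, ih (by omega)]
    constructor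
    · rintro ⟨h1, h2⟩ k hk1 hk2
      by_cases hk : len - j ≤ k
      · exact h1 k hk hk2
      · have : k = len - 1 - j := by omega
        rw [this]; exact h2
    · intro h
      exact ⟨fun k hk1 hk2 => h k (by omega) hk2, h (len - 1 - j) (by omega) (by omega)⟩


theorem pv_mpf_iff (D F : List Int) (mpg : Int) :
    ∀ s : Nat, 1 ≤ s → ∀ x : Int,
      (x ≤ pvMpf D F mpg s ↔ ∀ k, 1 ≤ k → k ≤ s → x ≤ pvPsum D F mpg k) := by
  intro s
  induction s with
  | zero => intro h; omega
  | succ s ih =>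
    intro _ x
    by_cases hs : s = 0
    · subst hs
      show x ≤ pvMpf D F mpg 1 ↔ _
      have : pvMpf D F mpg 1 = pvPsum D F mpg 1 := by simp [pvMpf]
      rw [this]
      constructor
      · intro h k hk1 hk2
        have : k = 1 := by omega
        rw [this]; exact h
      · intro h; exact h 1 le_rfl le_rfl
    · show x ≤ pvMpf D F mpg (s+1) ↔ _
      have : pvMpf D F mpg (s+1) = min (pvMpf D F mpg s) (pvPsum D F mpg (s+1)) := by
        simp [pvMpf, hs]
      rw [this, le_min_iff, ih (by omega)]
      constructor
      · rintro ⟨h1, h2⟩ k hk1 hk2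
        by_cases hk : k ≤ s
        · exact h1 k hk1 hk
        · have : k = s + 1 := by omega
          rw [this]; exact h2
      · intro h
        exact ⟨fun k hk1 hk2 => h k hk1 (by omega), h (s+1) (by omega) le_rfl⟩


-- pointwise equivalence of the two validity tests
theorem pv_valid_iff (D F : List Int) (mpg : Int) (s : Nat) (hs : s < D.length) :
    (pvInnerA D F mpg (D.length : Int) D.length 0 (s : Int) = true ↔ pvValidB D F mpg s) := by
  rw [pv_inner_iff]
  have hlen : 0 < D.length := by omega
  have key : (∀ u : Nat, 1 ≤ u → u ≤ D.length → 0 ≤ (0 : Int) + pvCyc D F mpg (D.length : Int) (s : Int) u) ↔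
      ((∀ k, s + 1 ≤ k → k ≤ D.length → pvPsum D F mpg s ≤ pvPsum D F mpg k) ∧
       (∀ k, 1 ≤ k → k ≤ s → pvPsum D F mpg s ≤ pvPsum D F mpg D.length + pvPsum D F mpg k)) := by
    constructor
    · intro h
      constructor
      · intro k hk1 hk2
        have hu := h (k - s) (by omega) (by omega)
        rw [pv_cyc_closed D F mpg (k - s) s hs (by omega), if_pos (by omega)] at hu
        have e : s + (k - s) = k := by omega
        rw [e] at hu
        linarith
      · intro k hk1 hk2
        have hu := h (D.length - s + k) (by omega) (by omega)
        rw [pv_cyc_closed D F mpg (D.length - s + k) s hs (by omega), if_neg (by omega)] at hu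
        have e : s + (D.length - s + k) - D.length = k := by omega
        rw [e] at hu
        linarith
    · rintro ⟨h1, h2⟩ u hu1 hu2
      rw [pv_cyc_closed D F mpg u s hs hu2]
      by_cases hc : s + u ≤ D.length
      · rw [if_pos hc]
        have := h1 (s + u) (by omega) hc
        linarith
      · rw [if_neg hc]
        have := h2 (s + u - D.length) (by omega) (by omega)
        linarith
  rw [key]
  unfold pvValidB
  constructor
  · rintro ⟨h1, h2⟩
    refine ⟨?_, ?_⟩
    · exact (pv_MSa_iff D F mpg D.length (D.length - 1 - s) (by omega) (pvPsum D F mpg s)).mpr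
        (fun k hk1 hk2 => h1 k (by omega) hk2)
    · by_cases hs0 : s = 0
      · exact Or.inl hs0
      · refine Or.inr ?_
        have := (pv_mpf_iff D F mpg s (by omega) (pvPsum D F mpg s - pvPsum D F mpg D.length)).mpr
          (fun k hk1 hk2 => by have := h2 k hk1 hk2; linarith)
        linarith
  · rintro ⟨hb1, hb2⟩
    refine ⟨?_, ?_⟩
    · intro k hk1 hk2
      exact (pv_MSa_iff D F mpg D.length (D.length - 1 - s) (by omega) (pvPsum D F mpg s)).mp hb1 k (by omega) hk2
    · intro k hk1 hk2
      rcases hb2 with hs0 | hge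
      · omega
      · have := (pv_mpf_iff D F mpg s (by omega) (pvPsum D F mpg s - pvPsum D F mpg D.length)).mp
          (by linarith) k hk1 hk2
        linarith


theorem pv_build_eq (D F : List Int) (mpg : Int) (n : Nat) :
    (List.range n).foldl (pvStepB D F mpg) ([0], [0]) =
      ((List.range (n+1)).map (pvPsum D F mpg), (List.range (n+1)).map (pvMpf D F mpg)) := by
  induction n with
  | zero =>
    simp only [List.range_zero, List.foldl_nil, List.range_succ, List.range_zero,
      List.nil_append, List.map_cons, List.map_nil]
    exact rfl
  | succ n ih =>
    rw [List.range_succ, List.foldl_append, ih]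
    show pvStepB D F mpg _ n = _
    unfold pvStepB
    simp only [pv_getD_map_range _ (n+1) n (by omega)]
    rw [List.range_succ (n := n+1)]
    simp only [List.map_append, List.map_cons, List.map_nil, Prod.mk.injEq]
    have hps : pvPsum D F mpg (n+1) = pvPsum D F mpg n +
        ((PySem.List.pyGet? F (n : Int)).getD 0 * mpg - (PySem.List.pyGet? D (n : Int)).getD 0) := by
      simp [pvPsum, pvGV]
    constructor
    · rw [hps]
    · by_cases hn : n = 0
      · subst hn
        have hm : pvMpf D F mpg 1 = pvPsum D F mpg 1 := by simp [pvMpf]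
        rw [if_pos rfl, hm, hps]
      · have hm : pvMpf D F mpg (n+1) = min (pvMpf D F mpg n) (pvPsum D F mpg (n+1)) := by
          simp [pvMpf, hn]
        rw [if_neg hn, hm, hps]


theorem pv_scan_eq (D F : List Int) (mpg : Int) :
    ∀ (k : Nat), k ≤ D.length → ∀ best : Int,
      pvScanB ((List.range (D.length + 1)).map (pvPsum D F mpg))
        ((List.range (D.length + 1)).map (pvMpf D F mpg))
        (pvPsum D F mpg D.length) k (pvMSa D F mpg D.length (D.length - k)) best =
      pvFirst (pvFv D F mpg k) best := by
  intro k
  induction k with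
  | zero => intro _ best; rfl
  | succ k ih =>
    intro hk best
    show pvScanB _ _ _ (k+1) _ best = _
    unfold pvScanB
    simp only [pv_getD_map_range _ (D.length+1) k (by omega)]
    have ems : D.length - (k+1) = D.length - 1 - k := by omega
    rw [ems]
    have emin : min (pvMSa D F mpg D.length (D.length - 1 - k)) (pvPsum D F mpg k) =
        pvMSa D F mpg D.length (D.length - k) := by
      have e1 : D.length - k = (D.length - 1 - k) + 1 := by omega
      rw [e1]
      show _ = min (pvMSa D F mpg D.length (D.length - 1 - k))
        (pvPsum D F mpg (D.length - 1 - (D.length - 1 - k)))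
      have e2 : D.length - 1 - (D.length - 1 - k) = k := by omega
      rw [e2]
    rw [emin, ih (by omega)]
    by_cases hv : pvValidB D F mpg k
    · rw [if_pos (show pvMSa D F mpg D.length (D.length - 1 - k) ≥ pvPsum D F mpg k ∧
        (k = 0 ∨ pvPsum D F mpg D.length + pvMpf D F mpg k ≥ pvPsum D F mpg k) from hv)]
      rcases hc : pvFv D F mpg k with _ | s
      · have efv : pvFv D F mpg (k+1) = some k := by
          simp [pvFv, hc]
          exact ⟨hv.1, fun h0 => hv.2.resolve_left h0⟩
        rw [efv]
        rfl
      · have efv : pvFv D F mpg (k+1) = some s := by simp [pvFv, hc]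
        rw [efv]
        rfl
    · rw [if_neg (show ¬(pvMSa D F mpg D.length (D.length - 1 - k) ≥ pvPsum D F mpg k ∧
        (k = 0 ∨ pvPsum D F mpg D.length + pvMpf D F mpg k ≥ pvPsum D F mpg k)) from hv)]
      have efv : pvFv D F mpg (k+1) = pvFv D F mpg k := by
        rcases hc : pvFv D F mpg k with _ | s
        · simp [pvFv, hc]
          intro h1
          refine ⟨fun h0 => hv ⟨h1, Or.inl h0⟩, ?_⟩
          exact lt_of_not_ge (fun hle => hv ⟨h1, Or.inr hle⟩)
        · simp [pvFv, hc]
      rw [efv]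


theorem pv_outer_eq (D F : List Int) (mpg : Int) :
    ∀ (k : Nat), k ≤ D.length →
      pvOuterA D F mpg (D.length : Int) k ((D.length - k : Nat) : Int) =
        pvFirst ((List.range' (D.length - k) k).find?
          (fun (s : Nat) => pvInnerA D F mpg (D.length : Int) D.length 0 ((s : Int)))) (-1) := by
  intro k
  induction k with
  | zero => intro _; rfl
  | succ k ih =>
    intro hk
    show (if pvInnerA D F mpg (D.length : Int) ((D.length : Int)).toNat 0 ((D.length - (k+1) : Nat) : Int) = true
          then ((D.length - (k+1) : Nat) : Int)
          else pvOuterA D F mpg (D.length : Int) k (((D.length - (k+1) : Nat) : Int) + 1)) = _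
    have etn : ((D.length : Int)).toNat = D.length := Int.toNat_natCast D.length
    rw [etn]
    have er : List.range' (D.length - (k+1)) (k+1) =
        (D.length - (k+1)) :: List.range' (D.length - k) k := by
      have e : D.length - (k+1) + 1 = D.length - k := by omega
      rw [List.range'_succ, e]
    rw [er, List.find?_cons]
    by_cases hp : pvInnerA D F mpg (D.length : Int) D.length 0 ((D.length - (k+1) : Nat) : Int) = true
    · rw [if_pos hp, hp]
      rfl
    · rw [if_neg hp]
      rw [Bool.eq_false_iff.mpr hp]
      have ec : ((D.length - (k+1) : Nat) : Int) + 1 = ((D.length - k : Nat) : Int) := by omega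
      rw [ec]
      exact ih (by omega)


theorem pv_fv_eq_find (D F : List Int) (mpg : Int) :
    ∀ k, k ≤ D.length →
      pvFv D F mpg k =
        (List.range k).find? (fun (s : Nat) => pvInnerA D F mpg (D.length : Int) D.length 0 ((s : Int))) := by
  intro k
  induction k with
  | zero => intro _; rfl
  | succ k ih =>
    intro hk
    rw [List.range_succ, List.find?_append]
    have elhs : pvFv D F mpg (k+1) = match pvFv D F mpg k with
        | some s => some s
        | none =>
          if pvMSa D F mpg D.length (D.length - 1 - k) ≥ pvPsum D F mpg k ∧
          (k = 0 ∨ pvPsum D F mpg D.length + pvMpf D F mpg k ≥ pvPsum D F mpg k)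
          then some k else none := rfl
    rw [elhs, ih (by omega)]
    rcases hc : (List.range k).find?
        (fun (s : Nat) => pvInnerA D F mpg (D.length : Int) D.length 0 ((s : Int))) with _ | s
    · by_cases hv : pvValidB D F mpg k
      · have hp := (pv_valid_iff D F mpg k (by omega)).mpr hv
        rw [if_pos (show pvMSa D F mpg D.length (D.length - 1 - k) ≥ pvPsum D F mpg k ∧
          (k = 0 ∨ pvPsum D F mpg D.length + pvMpf D F mpg k ≥ pvPsum D F mpg k) from hv)]
        simp [List.find?, hp]
      · have hp : pvInnerA D F mpg (D.length : Int) D.length 0 ((k : Int)) = false :=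
          Bool.eq_false_iff.mpr (fun h => hv ((pv_valid_iff D F mpg k (by omega)).mp h))
        rw [if_neg (show ¬(pvMSa D F mpg D.length (D.length - 1 - k) ≥ pvPsum D F mpg k ∧
          (k = 0 ∨ pvPsum D F mpg D.length + pvMpf D F mpg k ≥ pvPsum D F mpg k)) from hv)]
        simp [List.find?, hp]
    · simp


-- ===== VERDICT (by name: the statement is the Claim_ definition above) =====
theorem find_starting_city_spec : Claim_equal_find_starting_city := by
  intro D F mpg _ _
  unfold Spec_find_starting_city find_starting_city find_starting_city_alt
  simp only []
  by_cases h0 : D.length = 0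
  · rw [if_pos h0, h0]
    rfl
  · rw [if_neg h0, pv_build_eq]
    simp only [pv_getD_map_range _ (D.length+1) D.length (by omega)]
    have hA : pvOuterA D F mpg (D.length : Int) ((D.length : Int)).toNat 0 =
        pvFirst ((List.range' (D.length - D.length) D.length).find?
          (fun (s : Nat) => pvInnerA D F mpg (D.length : Int) D.length 0 ((s : Int)))) (-1) := by
      have := pv_outer_eq D F mpg D.length le_rfl
      rw [Int.toNat_natCast]
      have e : ((D.length - D.length : Nat) : Int) = 0 := by omega
      rw [e] at this
      exact this
    rw [hA]
    have e2 : D.length - D.length = 0 := by omega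
    rw [e2, ← List.range_eq_range', ← pv_fv_eq_find D F mpg D.length le_rfl]
    have hs := pv_scan_eq D F mpg D.length le_rfl (-1)
    rw [e2] at hs
    exact hs.symm
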